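-- pv_equiv track=rewrite | github.com/Kevinxsn/2D_spec_dict | anti_symmetric/anti_symmetric_util.py | find_conserved_numbers
-- ===== SOURCE A (Python) =====
-- from collections import defaultdict
--
-- def find_conserved_numbers(list_of_arrays, all_numbers):
--     """
--     Identifies which numbers have identical connections across all provided arrays.
--
--     Args:
--     list_of_arrays (list): A list containing lists of tuples.
--                            Example: [[(1,2)], [(2,1)]]
--     all_numbers (set): A set containing all numbers to analyze.
--
--     Returns:
--     tuple: (set of conserved numbers, set of non-conserved numbers)
--     """
--
--     # Step 1: Parse each array into an "Adjacency Map"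
--     # This converts the list of tuples into a format that is easy to compare.
--     # Structure: { 1: {2, 5}, 2: {1, 3} } -> Number 1 is connected to 2 and 5.
--     parsed_maps = []
--
--     for current_array in list_of_arrays:
--         # We use a default dict so we don't get errors if a number has no pairs
--         adj_map = defaultdict(set)
--
--         for num1, num2 in current_array:
--             # Add relationships both ways so order (x,y) vs (y,x) doesn't matter
--             adj_map[num1].add(num2)
--             adj_map[num2].add(num1)
--
--         parsed_maps.append(adj_map)
--
--     # Step 2: Check for conservation
--     conserved = set()
--     not_conserved = set()
--
--     for num in all_numbers:
--         # Get the partners of this number in the first array (reference)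
--         # If the number isn't in the array, it returns an empty set due to defaultdict
--         reference_partners = parsed_maps[0][num]
--
--         is_conserved = True
--
--         # Compare against all other arrays
--         for i in range(1, len(parsed_maps)):
--             current_partners = parsed_maps[i][num]
--
--             # If the set of partners is not exactly the same, it's not conserved
--             if reference_partners != current_partners:
--                 is_conserved = False
--                 break
--
--         if is_conserved:
--             conserved.add(num)
--         else:
--             not_conserved.add(num)
--
--     return conserved, not_conserved
-- ===== SOURCE B (Python) =====
-- def find_conserved_numbers(list_of_arrays, all_numbers):
--     """
--     Identifies which numbers have identical connections across all provided arrays.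
--     No adjacency dictionaries: for each number, scan every edge list directly for its
--     partners and collect one canonical signature (sorted partner tuple) per array;
--     the number is conserved iff all arrays produced the same signature.
--     """
--     conserved = set()
--     not_conserved = set()
--     for num in all_numbers:
--         signatures = {
--             tuple(sorted({y for x, y in arr if x == num} | {x for x, y in arr if y == num}))
--             for arr in list_of_arrays
--         }
--         if len(signatures) <= 1:
--             conserved.add(num)
--         else:
--             not_conserved.add(num)
--     return conserved, not_conserved
-- ===== Notes on version B (the rewrite author's own statement) =====
-- stated objective: simpler
-- what changed: B drops A's adjacency-dictionary pass and per-index reference comparison: for each number it scans the raw edge lists directly for partners and collects one canonical signature (sorted partner tuple) per array into a set, declaring the number conserved iff at most one distinct signature exists.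
-- crash fix: On an empty list_of_arrays with a non-empty all_numbers A raises IndexError (parsed_maps[0]); B returns (set(all_numbers), set()), every number being vacuously conserved. — e.g. on find_conserved_numbers([], [1, 2]): A raises IndexError, B returns ([1, 2], [])
import Mathlib
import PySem

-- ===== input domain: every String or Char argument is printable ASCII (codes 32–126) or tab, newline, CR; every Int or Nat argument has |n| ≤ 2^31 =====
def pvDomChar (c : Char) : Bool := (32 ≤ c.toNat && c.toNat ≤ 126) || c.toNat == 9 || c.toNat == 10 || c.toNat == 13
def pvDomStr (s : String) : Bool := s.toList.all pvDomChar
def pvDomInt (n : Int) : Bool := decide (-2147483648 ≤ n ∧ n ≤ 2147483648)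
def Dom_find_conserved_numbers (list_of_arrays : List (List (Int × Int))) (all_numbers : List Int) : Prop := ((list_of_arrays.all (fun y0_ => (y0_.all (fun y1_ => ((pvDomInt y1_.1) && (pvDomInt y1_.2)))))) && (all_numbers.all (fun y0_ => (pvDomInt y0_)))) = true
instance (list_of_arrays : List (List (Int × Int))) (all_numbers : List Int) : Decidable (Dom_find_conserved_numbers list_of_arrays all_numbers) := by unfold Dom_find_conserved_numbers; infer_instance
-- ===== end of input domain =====

-- B replaces A's adjacency-dictionary pass with direct per-number scans of the edge
-- lists and a set of canonical signatures (simpler decomposition, not faster).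

-- ===== PORT A =====
-- Step 1 of A: build one adjacency map (defaultdict(set)) per array.
def pvBuildAdj (current_array : List (Int × Int)) : PySem.Dict Int (PySem.Set Int) :=
  current_array.foldl (fun adj p =>
    let adj1 := adj.insert p.1 (PySem.Set.add (adj.getD p.1 PySem.Set.empty) p.2)
    adj1.insert p.2 (PySem.Set.add (adj1.getD p.2 PySem.Set.empty) p.1))
    PySem.Dict.empty

def find_conserved_numbers (list_of_arrays : List (List (Int × Int))) (all_numbers : List Int) : List Int × List Int :=
  let parsed_maps := list_of_arrays.map pvBuildAdj
  all_numbers.foldl (fun (s : PySem.Set Int × PySem.Set Int) num =>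
    match PySem.List.pyGet? parsed_maps 0 with
    | none => s  -- parsed_maps[0] raises IndexError here: excluded by Pre_
    | some m0 =>
      let reference_partners := m0.getD num PySem.Set.empty
      let is_conserved := (PySem.List.pyRange 1 (parsed_maps.length : Int) 1).foldl
        (fun b i =>
          if b then  -- 'b' stays false after the break
            if PySem.Set.equal reference_partners
                ((PySem.List.pyGetD parsed_maps i PySem.Dict.empty).getD num PySem.Set.empty)
            then b else false
          else b) true
      if is_conserved then (PySem.Set.add s.1 num, s.2) else (s.1, PySem.Set.add s.2 num))
    (PySem.Set.empty, PySem.Set.empty)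

-- ===== PORT B =====
-- {y for x, y in arr if x == num} | {x for x, y in arr if y == num}
def pvPartners (arr : List (Int × Int)) (num : Int) : PySem.Set Int :=
  PySem.Set.union (PySem.Set.ofList ((arr.filter (fun p => p.1 == num)).map (fun p => p.2)))
                  ((arr.filter (fun p => p.2 == num)).map (fun p => p.1))

-- tuple(sorted(partners))
def pvSignature (arr : List (Int × Int)) (num : Int) : List Int :=
  PySem.List.sorted (pvPartners arr num) (fun x => x) false

def find_conserved_numbers_alt (list_of_arrays : List (List (Int × Int))) (all_numbers : List Int) : List Int × List Int :=
  all_numbers.foldl (fun (s : PySem.Set Int × PySem.Set Int) num =>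
    let signatures : PySem.Set (List Int) :=
      PySem.Set.ofList (list_of_arrays.map (fun arr => pvSignature arr num))
    if signatures.length ≤ 1 then (PySem.Set.add s.1 num, s.2) else (s.1, PySem.Set.add s.2 num))
    (PySem.Set.empty, PySem.Set.empty)

-- ===== PRECONDITION & SPEC =====
-- Pre_ excludes only the inputs where A raises IndexError: empty list_of_arrays with a non-empty all_numbers.
def Pre_find_conserved_numbers (list_of_arrays : List (List (Int × Int))) (all_numbers : List Int) : Prop :=
  list_of_arrays ≠ [] ∨ all_numbers = []
instance (list_of_arrays : List (List (Int × Int))) (all_numbers : List Int) : Decidable (Pre_find_conserved_numbers list_of_arrays all_numbers) := by unfold Pre_find_conserved_numbers; infer_instance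

def pvWitness_find_conserved_numbers : (List (List (Int × Int))) × List Int :=
  ([[(1, 2), (2, 3)], [(2, 1)]], [1, 2, 3])

-- On an empty list_of_arrays with a non-empty all_numbers A raises IndexError (parsed_maps[0]);
-- B returns (set(all_numbers), set()), every number being vacuously conserved.
def Raises_find_conserved_numbers (list_of_arrays : List (List (Int × Int))) (all_numbers : List Int) : Prop :=
  list_of_arrays = [] ∧ all_numbers ≠ []
instance (list_of_arrays : List (List (Int × Int))) (all_numbers : List Int) : Decidable (Raises_find_conserved_numbers list_of_arrays all_numbers) := by unfold Raises_find_conserved_numbers; infer_instance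

def pvRaiseWitness_find_conserved_numbers : (List (List (Int × Int))) × List Int := ([], [1, 2])
def pvRaiseWitnessOut_find_conserved_numbers : List Int × List Int := ([1, 2], [])

def Spec_find_conserved_numbers (list_of_arrays : List (List (Int × Int))) (all_numbers : List Int) (out : List Int × List Int) : Prop := out = find_conserved_numbers_alt list_of_arrays all_numbers
instance (list_of_arrays : List (List (Int × Int))) (all_numbers : List Int) (out : List Int × List Int) : Decidable (Spec_find_conserved_numbers list_of_arrays all_numbers out) := by unfold Spec_find_conserved_numbers; infer_instance

-- ===== CLAIM (what is proved, stated in full; the proofs are below) =====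
def Claim_equal_find_conserved_numbers : Prop := ∀ (list_of_arrays : List (List (Int × Int))) (all_numbers : List Int), Dom_find_conserved_numbers list_of_arrays all_numbers → Pre_find_conserved_numbers list_of_arrays all_numbers → Spec_find_conserved_numbers list_of_arrays all_numbers (find_conserved_numbers list_of_arrays all_numbers)

def Claim_raises_find_conserved_numbers : Prop := (∀ (list_of_arrays : List (List (Int × Int))) (all_numbers : List Int), Dom_find_conserved_numbers list_of_arrays all_numbers → Raises_find_conserved_numbers list_of_arrays all_numbers → ¬ Pre_find_conserved_numbers list_of_arrays all_numbers) ∧ (Dom_find_conserved_numbers (pvRaiseWitness_find_conserved_numbers.1) (pvRaiseWitness_find_conserved_numbers.2) ∧ Raises_find_conserved_numbers (pvRaiseWitness_find_conserved_numbers.1) (pvRaiseWitness_find_conserved_numbers.2) ∧ find_conserved_numbers_alt (pvRaiseWitness_find_conserved_numbers.1) (pvRaiseWitness_find_conserved_numbers.2) = pvRaiseWitnessOut_find_conserved_numbers)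

-- ===== LEMMAS AND PROOFS =====

-- membership in the adjacency map A builds
theorem pv_mem_foldAdj (arr : List (Int × Int)) (d : PySem.Dict Int (PySem.Set Int)) (num x : Int) :
    x ∈ (arr.foldl (fun adj p =>
      let adj1 := adj.insert p.1 (PySem.Set.add (adj.getD p.1 PySem.Set.empty) p.2)
      adj1.insert p.2 (PySem.Set.add (adj1.getD p.2 PySem.Set.empty) p.1)) d).getD num PySem.Set.empty
    ↔ x ∈ d.getD num PySem.Set.empty ∨ (num, x) ∈ arr ∨ (x, num) ∈ arr := by
  induction arr generalizing d with
  | nil => simp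
  | cons p t ih =>
    simp only [List.foldl_cons, ih, List.mem_cons, Prod.ext_iff]
    simp only [PySem.Dict.getD_insert]
    by_cases h1 : num = p.1 <;> by_cases h2 : num = p.2 <;>
      simp [h1, h2] <;> constructor <;> intro h <;> aesop

theorem pv_mem_buildAdj (arr : List (Int × Int)) (num x : Int) :
    x ∈ (pvBuildAdj arr).getD num PySem.Set.empty ↔ (num, x) ∈ arr ∨ (x, num) ∈ arr := by
  unfold pvBuildAdj
  rw [pv_mem_foldAdj]
  simp

theorem pv_mem_partners (arr : List (Int × Int)) (num x : Int) :
    x ∈ pvPartners arr num ↔ (num, x) ∈ arr ∨ (x, num) ∈ arr := by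
  unfold pvPartners
  rw [PySem.Set.mem_union]
  simp only [PySem.Set.mem_ofList, List.mem_map, List.mem_filter]
  constructor
  · rintro (⟨⟨u, v⟩, ⟨hp, he⟩, rfl⟩ | ⟨⟨u, v⟩, ⟨hp, he⟩, rfl⟩) <;> simp only [beq_iff_eq] at he <;> subst he
    · exact Or.inl hp
    · exact Or.inr hp
  · rintro (h | h)
    · exact Or.inl ⟨(num, x), ⟨h, by simp⟩, rfl⟩
    · exact Or.inr ⟨(x, num), ⟨h, by simp⟩, rfl⟩

theorem pv_nodup_partners (arr : List (Int × Int)) (num : Int) : (pvPartners arr num).Nodup := by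
  unfold pvPartners
  exact PySem.Set.nodup_union _ _ (PySem.Set.nodup_ofList _)

-- two signatures coincide iff A's adjacency lookups are set-equal
theorem pv_sig_eq_iff (a b : List (Int × Int)) (num : Int) :
    (pvSignature a num = pvSignature b num)
    ↔ PySem.Set.equal ((pvBuildAdj a).getD num PySem.Set.empty)
        ((pvBuildAdj b).getD num PySem.Set.empty) = true := by
  unfold pvSignature
  rw [PySem.List.sorted_id_eq_sorted_id_iff_perm,
      List.perm_ext_iff_of_nodup (pv_nodup_partners a num) (pv_nodup_partners b num),
      PySem.Set.equal_iff]
  constructor <;> intro h x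
  · rw [pv_mem_buildAdj, pv_mem_buildAdj]
    have := h x
    rwa [pv_mem_partners, pv_mem_partners] at this
  · rw [pv_mem_partners, pv_mem_partners]
    have := h x
    rwa [pv_mem_buildAdj, pv_mem_buildAdj] at this

-- the break-flag fold is List.all
theorem pv_foldl_break_all {α : Type} (l : List α) (p : α → Bool) (b : Bool) :
    l.foldl (fun b i => if b then (if p i then b else false) else b) b = (b && l.all p) := by
  induction l generalizing b with
  | nil => simp
  | cons x t ih =>
    cases b
    · simpa using ih false
    · by_cases hx : p x
      · simpa [hx] using ih true
      · simpa [hx] using ih false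

-- a set built from a nonempty list has at most one element iff everything equals the head
theorem pv_ofList_len_le_one {α : Type} [BEq α] [LawfulBEq α] (a : α) (l : List α) :
    (PySem.Set.ofList (a :: l)).length ≤ 1 ↔ ∀ y ∈ l, y = a := by
  have hkey : ((PySem.Set.ofList l).discard a = []) ↔ ∀ y ∈ l, y = a := by
    rw [List.eq_nil_iff_forall_not_mem]
    constructor
    · intro h y hy
      by_contra hne
      exact h y (by rw [PySem.Set.mem_discard]; exact ⟨(PySem.Set.mem_ofList _ _).mpr hy, hne⟩)
    · intro h y hy
      rw [PySem.Set.mem_discard, PySem.Set.mem_ofList] at hy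
      exact hy.2 (h y hy.1)
  rw [PySem.Set.ofList_cons, List.length_cons, ← hkey, ← List.length_eq_zero_iff]
  omega

-- per-number agreement of the two conservation tests, for a nonempty list_of_arrays
theorem pv_cond_eq (m : List (Int × Int)) (rest : List (List (Int × Int))) (num : Int) :
    ((PySem.List.pyRange 1 ((((m :: rest).map pvBuildAdj).length : Int)) 1).foldl
      (fun b i =>
        if b then
          if PySem.Set.equal ((pvBuildAdj m).getD num PySem.Set.empty)
              ((PySem.List.pyGetD ((m :: rest).map pvBuildAdj) i PySem.Dict.empty).getD num PySem.Set.empty)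
          then b else false
        else b) true = true)
    ↔ (PySem.Set.ofList ((m :: rest).map (fun arr => pvSignature arr num))).length ≤ 1 := by
  rw [pv_foldl_break_all, Bool.true_and]
  rw [show (fun i => PySem.Set.equal ((pvBuildAdj m).getD num PySem.Set.empty)
        ((PySem.List.pyGetD ((m :: rest).map pvBuildAdj) i PySem.Dict.empty).getD num PySem.Set.empty))
      = (fun mi => PySem.Set.equal ((pvBuildAdj m).getD num PySem.Set.empty)
            (mi.getD num PySem.Set.empty)) ∘ (fun i => PySem.List.pyGetD ((m :: rest).map pvBuildAdj) i PySem.Dict.empty)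
      from rfl]
  rw [← List.all_map, PySem.List.map_pyGetD_pyRange' ((m :: rest).map pvBuildAdj) PySem.Dict.empty (a := 1) (by norm_num)]
  rw [show (((m :: rest).map pvBuildAdj).drop (1 : Int).toNat) = rest.map pvBuildAdj by simp]
  rw [List.map_cons, pv_ofList_len_le_one, List.all_map, List.all_eq_true]
  constructor
  · intro h y hy
    rw [List.mem_map] at hy
    obtain ⟨arr, harr, rfl⟩ := hy
    refine (pv_sig_eq_iff arr m num).mpr ?_
    have := h arr harr
    simp only [Function.comp] at this
    rw [PySem.Set.equal_iff] at this ⊢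
    intro x
    exact (this x).symm
  · intro h arr harr
    have := (pv_sig_eq_iff arr m num).mp
      (h (pvSignature arr num) (List.mem_map.mpr ⟨arr, harr, rfl⟩))
    simp only [Function.comp]
    rw [PySem.Set.equal_iff] at this ⊢
    intro x
    exact (this x).symm

-- ===== VERDICT (by name: the statement is the Claim_ definition above) =====
theorem find_conserved_numbers_spec : Claim_equal_find_conserved_numbers := by
  intro loa an _ hpre
  unfold Spec_find_conserved_numbers
  cases loa with
  | nil =>
    rcases hpre with h | h
    · exact absurd rfl h
    · subst h; rfl
  | cons m rest =>
    unfold find_conserved_numbers find_conserved_numbers_alt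
    refine congrArg (fun f => an.foldl f (PySem.Set.empty, PySem.Set.empty)) ?_
    funext s num
    have hget : PySem.List.pyGet? ((m :: rest).map pvBuildAdj) 0 = some (pvBuildAdj m) := by
      simp [PySem.List.pyGet?, PySem.List.pyIdx?]
    simp only [hget]
    have hc := pv_cond_eq m rest num
    by_cases h : (PySem.Set.ofList ((m :: rest).map (fun arr => pvSignature arr num))).length ≤ 1
    · rw [if_pos h, if_pos (hc.mpr h)]
    · rw [if_neg h, if_neg (fun hh => h (hc.mp hh))]

@[simp] theorem find_conserved_numbers_raises : Claim_raises_find_conserved_numbers := by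
  unfold Claim_raises_find_conserved_numbers
  constructor
  · rintro loa an _ ⟨h1, h2⟩ hpre
    rcases hpre with h | h
    · exact h h1
    · exact h2 h
  · decide
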